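-- pv_equiv track=rewrite | github.com/aweinstock314/clemency-asm | extra/BitsNBytes.py | DecodeDefconBytes
-- ===== SOURCE A (Python) =====
-- def DecodeDefconBytes(DefconBytes, stringify=False):
-- 	res = []
-- 	buff = ''
-- 	for i in range(len(DefconBytes)):
-- 		buff += '{:08b}'.format(ord(DefconBytes[i]))
-- 		if len(buff) >= 9:
-- 			res.append(int(buff[:9], 2))
-- 			buff = buff[9:]
-- 	if stringify:
-- 		return ''.join(map(chr, res))
-- 	return res
-- ===== SOURCE B (Python) =====
-- def DecodeDefconBytes(DefconBytes, stringify=False):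
--     # pass 1: build the whole bit string; pass 2: walk it in 9-bit steps
--     full = ''.join('{:08b}'.format(ord(c)) for c in DefconBytes)
--     res = []
--     i = 0
--     while i + 9 <= len(full):
--         res.append(int(full[i:i+9], 2))
--         i += 9
--     if stringify:
--         return ''.join(map(chr, res))
--     return res
-- ===== Notes on version B (the rewrite author's own statement) =====
-- stated objective: alternative
-- what changed: A interleaves bit accumulation and 9-bit extraction in one loop over the characters; B is two separately-shaped passes: first concatenate all 8-bit codes into one bit string, then drain consecutive 9-bit chunks from it.
-- outside the precondition, e.g. on DecodeDefconBytes('AB', True): A returns '\x82', B returns '\x82'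
import Mathlib
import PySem

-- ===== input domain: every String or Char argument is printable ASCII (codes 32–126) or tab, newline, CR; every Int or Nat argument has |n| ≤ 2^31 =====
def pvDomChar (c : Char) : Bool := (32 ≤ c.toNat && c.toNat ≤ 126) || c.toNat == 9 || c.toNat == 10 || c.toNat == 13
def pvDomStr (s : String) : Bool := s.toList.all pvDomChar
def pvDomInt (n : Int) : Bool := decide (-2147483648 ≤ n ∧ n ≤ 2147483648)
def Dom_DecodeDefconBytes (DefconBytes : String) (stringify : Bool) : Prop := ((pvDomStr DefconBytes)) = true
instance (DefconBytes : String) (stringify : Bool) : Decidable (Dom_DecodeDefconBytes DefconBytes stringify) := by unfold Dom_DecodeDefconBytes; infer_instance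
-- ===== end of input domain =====

-- B replaces A's interleaved accumulate-and-drain loop by two separate passes
-- (concatenate all 8-bit codes, then drain 9-bit chunks): an alternative decomposition.
-- Pre_ excludes stringify = true, on which A returns a str rather than the declared list of ints.


-- shared helper: '{:08b}'.format(ord c) as a list of '0'/'1' chars (both Pythons format this way)
def pvBin8 (c : Char) : List Char :=
  (List.range 8).map (fun i => if Nat.testBit c.toNat (7 - i) then '1' else '0')

-- int(bits, 2) on a list of '0'/'1' chars
def pvBinVal (bs : List Char) : Int :=
  bs.foldl (fun a c => 2 * a + (if c = '1' then 1 else 0)) 0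

-- ===== PORT A =====
-- one loop over the characters, state (res, buff); drains a 9-bit chunk as soon as buff has ≥ 9 bits
def pvStepA (st : List Int × List Char) (c : Char) : List Int × List Char :=
  let buff := st.2 ++ pvBin8 c
  if 9 ≤ buff.length then (st.1 ++ [pvBinVal (buff.take 9)], buff.drop 9)
  else (st.1, buff)

-- the stringify=True branch returns a str, outside the declared type; Pre_ excludes it
def DecodeDefconBytes (DefconBytes : String) (stringify : Bool) : List Int :=
  (DefconBytes.toList.foldl pvStepA ([], [])).1

-- ===== PORT B =====
-- second pass of Source B: while i + 9 <= len(full): append int(full[i:i+9], 2); i += 9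
def pvChunkB (full : List Char) (i : Nat) : List Int :=
  if i + 9 ≤ full.length then pvBinVal ((full.drop i).take 9) :: pvChunkB full (i + 9) else []
termination_by full.length - i
decreasing_by omega

def DecodeDefconBytes_alt (DefconBytes : String) (stringify : Bool) : List Int :=
  pvChunkB (DefconBytes.toList.flatMap pvBin8) 0

-- ===== PRECONDITION & SPEC =====
-- Pre_ excludes stringify = true, on which A returns a str, not a value of the declared type list[int].
def Pre_DecodeDefconBytes (DefconBytes : String) (stringify : Bool) : Prop := stringify = false
instance (DefconBytes : String) (stringify : Bool) : Decidable (Pre_DecodeDefconBytes DefconBytes stringify) := by unfold Pre_DecodeDefconBytes; infer_instance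
def pvWitness_DecodeDefconBytes : String × Bool := ("AB", false)

def Spec_DecodeDefconBytes (DefconBytes : String) (stringify : Bool) (out : List Int) : Prop := out = DecodeDefconBytes_alt DefconBytes stringify
instance (DefconBytes : String) (stringify : Bool) (out : List Int) : Decidable (Spec_DecodeDefconBytes DefconBytes stringify out) := by unfold Spec_DecodeDefconBytes; infer_instance

-- ===== CLAIM (what is proved, stated in full; the proofs are below) =====
def Claim_equal_DecodeDefconBytes : Prop := ∀ (DefconBytes : String) (stringify : Bool), Dom_DecodeDefconBytes DefconBytes stringify → Pre_DecodeDefconBytes DefconBytes stringify → Spec_DecodeDefconBytes DefconBytes stringify (DecodeDefconBytes DefconBytes stringify)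

-- ===== LEMMAS AND PROOFS =====

-- proof-only helper: the chunking expressed as structural take/drop recursion
def pvChunkD (bs : List Char) : List Int :=
  if 9 ≤ bs.length then pvBinVal (bs.take 9) :: pvChunkD (bs.drop 9) else []
termination_by bs.length
decreasing_by simp only [List.length_drop]; omega

theorem pvChunkD_ge (bs : List Char) (h : 9 ≤ bs.length) :
    pvChunkD bs = pvBinVal (bs.take 9) :: pvChunkD (bs.drop 9) := by
  rw [pvChunkD]; simp [h]

theorem pvChunkD_lt (bs : List Char) (h : bs.length < 9) : pvChunkD bs = [] := by
  rw [pvChunkD]; simp [Nat.not_le.mpr h]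

theorem pvChunkB_eq_D (full : List Char) (i : Nat) :
    pvChunkB full i = pvChunkD (full.drop i) := by
  fun_induction pvChunkB full i with
  | case1 i h ih =>
    rw [ih, pvChunkD_ge (full.drop i) (by simp only [List.length_drop]; omega),
      List.drop_drop]
  | case2 i h =>
    rw [pvChunkD_lt (full.drop i) (by simp only [List.length_drop]; omega)]

theorem pvBin8_length (c : Char) : (pvBin8 c).length = 8 := by simp [pvBin8]

theorem pvLoop_eq (l : List Char) (res : List Int) (buff : List Char) (hb : buff.length < 9) :
    (l.foldl pvStepA (res, buff)).1 = res ++ pvChunkD (buff ++ l.flatMap pvBin8) := by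
  induction l generalizing res buff with
  | nil => simp [pvChunkD_lt buff hb]
  | cons c l ih =>
    simp only [List.foldl_cons, List.flatMap_cons]
    have hlen : (buff ++ pvBin8 c).length = buff.length + 8 := by
      simp [pvBin8_length]
    by_cases h : 9 ≤ (buff ++ pvBin8 c).length
    · have hstep : pvStepA (res, buff) c
          = (res ++ [pvBinVal ((buff ++ pvBin8 c).take 9)], (buff ++ pvBin8 c).drop 9) := by
        simp only [pvStepA, if_pos h]
      have h9 : 9 ≤ buff.length + 8 := hlen ▸ h
      rw [hstep, ih _ _ (by simp only [List.length_drop, hlen]; omega)]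
      rw [← List.append_assoc,
        pvChunkD_ge (buff ++ pvBin8 c ++ l.flatMap pvBin8)
          (by simp only [List.length_append, hlen]; omega),
        List.take_append_of_le_length h, List.drop_append_of_le_length h]
      simp
    · have hstep : pvStepA (res, buff) c = (res, buff ++ pvBin8 c) := by
        simp only [pvStepA, if_neg h]
      have h9 : ¬ 9 ≤ buff.length + 8 := hlen ▸ h
      rw [hstep, ih _ _ (by omega), List.append_assoc]

-- ===== VERDICT (by name: the statement is the Claim_ definition above) =====
theorem DecodeDefconBytes_spec : Claim_equal_DecodeDefconBytes := by
  intro s st _ _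
  unfold Spec_DecodeDefconBytes DecodeDefconBytes DecodeDefconBytes_alt
  rw [pvLoop_eq s.toList [] [] (by simp), pvChunkB_eq_D]
  simp
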